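-- pv_equiv track=rewrite | github.com/sachdev27/tarko-stock-flow | backend/services/sync_service.py | _parse_rsync_stats
-- ===== SOURCE A (Python) =====
-- def _parse_rsync_stats(output):
--     """Parse rsync stats from output"""
--     stats = {
--         'files_transferred': 0,
--         'bytes_sent': 0,
--         'total_size': 0
--     }
--
--     for line in output.split('\n'):
--         if 'Number of files transferred:' in line:
--             try:
--                 stats['files_transferred'] = int(line.split(':')[1].strip())
--             except:
--                 pass
--         elif 'Total transferred file size:' in line:
--             try:
--                 size_str = line.split(':')[1].strip().split()[0].replace(',', '')
--                 stats['total_size'] = int(size_str)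
--             except:
--                 pass
--         elif 'sent' in line.lower() and 'bytes' in line.lower():
--             try:
--                 # Parse "sent 1,234 bytes  received 456 bytes"
--                 parts = line.split('sent')[1].split('bytes')[0].replace(',', '').strip()
--                 stats['bytes_sent'] = int(parts)
--             except:
--                 pass
--
--     return stats
-- ===== SOURCE B (Python) =====
-- # B: builds the result once from three independent field extractors, each taking
-- # the last line of the output that parses for that field (reverse scan, first hit).
-- def _parse_rsync_stats(output):
--     """Parse rsync stats from output"""
--     lines = output.split('\n')
--
--     def last_match(matches):
--         for line in reversed(lines):
--             value = matches(line)
--             if value is not None: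
--                 return value
--         return 0
--
--     def colon_field(marker, clean):
--         def matches(line):
--             if marker in line:
--                 try:
--                     return int(clean(line.split(':')[1]))
--                 except:
--                     return None
--         return matches
--
--     def sent_bytes(line):
--         low = line.lower()
--         if 'sent' in low and 'bytes' in low:
--             try:
--                 return int(line.split('sent')[1].split('bytes')[0].replace(',', '').strip())
--             except:
--                 return None
--
--     return {
--         'files_transferred': last_match(colon_field('Number of files transferred:', str.strip)),
--         'bytes_sent': last_match(sent_bytes),
--         'total_size': last_match(colon_field('Total transferred file size:',
--                                              lambda s: s.strip().split()[0].replace(',', ''))),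
--     }
-- ===== Notes on version B (the rewrite author's own statement) =====
-- stated objective: alternative
-- what changed: Replaces the forward stateful elif-loop over a mutable stats dict by three independent per-field extractors (a generic colon-field parser and a sent/bytes parser) that scan the lines in reverse and take the first successful parse, building the result dict once; Pre_ excludes outputs in which some line matches more than one field pattern, where A's elif ordering silently picks a single field by accidental precedence.
import Mathlib
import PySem

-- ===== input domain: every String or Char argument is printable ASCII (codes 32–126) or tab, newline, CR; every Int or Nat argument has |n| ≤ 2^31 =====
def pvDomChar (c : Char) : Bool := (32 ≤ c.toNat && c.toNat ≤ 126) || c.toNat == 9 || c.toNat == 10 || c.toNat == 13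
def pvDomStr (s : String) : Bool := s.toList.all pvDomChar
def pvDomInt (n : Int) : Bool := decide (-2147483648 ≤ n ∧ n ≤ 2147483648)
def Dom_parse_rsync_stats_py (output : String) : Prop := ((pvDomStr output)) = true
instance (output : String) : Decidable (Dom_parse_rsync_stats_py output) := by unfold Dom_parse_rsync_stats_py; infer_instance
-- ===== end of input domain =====

-- B builds the result once from three independent per-field reverse scans (last
-- successful parse wins) instead of A's forward elif-loop over a mutable dict;
-- Pre_ excludes outputs in which some line matches more than one field pattern.
-- String operations are ported on the List Char side (PySem.Chars), which is exact.

-- ===== PORT A =====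
-- try: stats['files_transferred'] = int(line.split(':')[1].strip()) ; except: pass
def pvATryFiles (line : List Char) : Option Int :=
  match PySem.List.pyGet? (PySem.Chars.splitOn line ":".toList) 1 with
  | none => none
  | some s => PySem.Int.ofChars? (PySem.Chars.strip s)

-- try: size_str = line.split(':')[1].strip().split()[0].replace(',', '') ; int(size_str)
def pvATryTotal (line : List Char) : Option Int :=
  match PySem.List.pyGet? (PySem.Chars.splitOn line ":".toList) 1 with
  | none => none
  | some s =>
    match PySem.List.pyGet? (PySem.Chars.split₀ (PySem.Chars.strip s)) 0 with
    | none => none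
    | some w => PySem.Int.ofChars? (PySem.Chars.replace w ",".toList "".toList)

-- try: parts = line.split('sent')[1].split('bytes')[0].replace(',', '').strip() ; int(parts)
def pvATrySent (line : List Char) : Option Int :=
  match PySem.List.pyGet? (PySem.Chars.splitOn line "sent".toList) 1 with
  | none => none
  | some s =>
    match PySem.List.pyGet? (PySem.Chars.splitOn s "bytes".toList) 0 with
    | none => none
    | some w => PySem.Int.ofChars? (PySem.Chars.strip (PySem.Chars.replace w ",".toList "".toList))

-- the body of A's for-loop: one line updates the mutable stats dict (if/elif/elif)
def pvAStep (stats : PySem.Dict String Int) (line : List Char) : PySem.Dict String Int :=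
  if PySem.Chars.isIn "Number of files transferred:".toList line then
    match pvATryFiles line with
    | some v => stats.insert "files_transferred" v
    | none => stats
  else if PySem.Chars.isIn "Total transferred file size:".toList line then
    match pvATryTotal line with
    | some v => stats.insert "total_size" v
    | none => stats
  else if PySem.Chars.isIn "sent".toList (PySem.Chars.lower line)
          && PySem.Chars.isIn "bytes".toList (PySem.Chars.lower line) then
    match pvATrySent line with
    | some v => stats.insert "bytes_sent" v
    | none => stats
  else stats

def parse_rsync_stats_py (output : String) : List (String × Int) :=
  ((PySem.Chars.splitOn output.toList "\n".toList).foldl pvAStep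
    (((PySem.Dict.empty.insert "files_transferred" 0).insert "bytes_sent" 0).insert "total_size" 0)).items

-- ===== PORT B =====
-- colon_field(marker, clean): generic extractor for the two 'Marker: value' fields;
-- clean returns none where the Python clean function raises (caught by the try)
def pvBColonField (marker : List Char) (clean : List Char → Option (List Char))
    (line : List Char) : Option Int :=
  if PySem.Chars.isIn marker line then
    match PySem.List.pyGet? (PySem.Chars.splitOn line ":".toList) 1 with
    | some s => (clean s).bind PySem.Int.ofChars?
    | none => none
  else none

-- str.strip
def pvBCleanFiles (s : List Char) : Option (List Char) := some (PySem.Chars.strip s)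

-- lambda s: s.strip().split()[0].replace(',', '')
def pvBCleanTotal (s : List Char) : Option (List Char) :=
  (PySem.List.pyGet? (PySem.Chars.split₀ (PySem.Chars.strip s)) 0).map
    (fun w => PySem.Chars.replace w ",".toList "".toList)

-- sent_bytes(line)
def pvBSentBytes (line : List Char) : Option Int :=
  if PySem.Chars.isIn "sent".toList (PySem.Chars.lower line)
      && PySem.Chars.isIn "bytes".toList (PySem.Chars.lower line) then
    match PySem.List.pyGet? (PySem.Chars.splitOn line "sent".toList) 1 with
    | some s =>
      match PySem.List.pyGet? (PySem.Chars.splitOn s "bytes".toList) 0 with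
      | some w => PySem.Int.ofChars? (PySem.Chars.strip (PySem.Chars.replace w ",".toList "".toList))
      | none => none
    | none => none
  else none

-- last_match(matches): first hit over the reversed lines, default 0
def pvBLastMatch (m : List Char → Option Int) : List (List Char) → Int
  | [] => 0
  | l :: ls =>
    match m l with
    | some v => v
    | none => pvBLastMatch m ls

def parse_rsync_stats_py_alt (output : String) : List (String × Int) :=
  let revLines := (PySem.Chars.splitOn output.toList "\n".toList).reverse
  [("files_transferred",
      pvBLastMatch (pvBColonField "Number of files transferred:".toList pvBCleanFiles) revLines),
   ("bytes_sent", pvBLastMatch pvBSentBytes revLines),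
   ("total_size",
      pvBLastMatch (pvBColonField "Total transferred file size:".toList pvBCleanTotal) revLines)]

-- ===== PRECONDITION & SPEC =====
-- the three field patterns of a line, and how many of them it matches
abbrev pvM1 (line : List Char) : Bool := PySem.Chars.isIn "Number of files transferred:".toList line
abbrev pvM2 (line : List Char) : Bool := PySem.Chars.isIn "Total transferred file size:".toList line
abbrev pvM3 (line : List Char) : Bool :=
  PySem.Chars.isIn "sent".toList (PySem.Chars.lower line)
    && PySem.Chars.isIn "bytes".toList (PySem.Chars.lower line)
def pvMarks (line : List Char) : Nat :=
  cond (pvM1 line) 1 0 + cond (pvM2 line) 1 0 + cond (pvM3 line) 1 0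

-- Pre_ excludes outputs in which some line matches more than one of the three field
-- patterns: there A's elif ordering silently assigns the line to a single field by
-- accidental precedence, while B's independent extractors may fill several fields.
def Pre_parse_rsync_stats_py (output : String) : Prop :=
  ∀ line ∈ PySem.Chars.splitOn output.toList "\n".toList, pvMarks line ≤ 1
instance (output : String) : Decidable (Pre_parse_rsync_stats_py output) := by
  unfold Pre_parse_rsync_stats_py; infer_instance

def pvWitness_parse_rsync_stats_py : String :=
  "Number of files transferred: 3\nTotal transferred file size: 1,234\nsent 100 bytes  received 50 bytes"

def Spec_parse_rsync_stats_py (output : String) (out : List (String × Int)) : Prop :=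
  out = parse_rsync_stats_py_alt output
instance (output : String) (out : List (String × Int)) : Decidable (Spec_parse_rsync_stats_py output out) := by
  unfold Spec_parse_rsync_stats_py; infer_instance

-- ===== CLAIM (what is proved, stated in full; the proofs are below) =====
def Claim_equal_parse_rsync_stats_py : Prop :=
  ∀ (output : String), Dom_parse_rsync_stats_py output → Pre_parse_rsync_stats_py output →
    Spec_parse_rsync_stats_py output (parse_rsync_stats_py output)

-- ===== LEMMAS AND PROOFS =====

-- the three-field dict A's loop maintains, as a function of its three values
def pvMkD (f b t : Int) : PySem.Dict String Int :=
  ((PySem.Dict.empty.insert "files_transferred" f).insert "bytes_sent" b).insert "total_size" t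

-- pvBLastMatch with an explicit default, for the fold/reverse induction
def pvLastD (g : List Char → Option Int) (ls : List (List Char)) (d : Int) : Int :=
  match ls with
  | [] => d
  | l :: ls' =>
    match g l with
    | some v => v
    | none => pvLastD g ls' d

-- B's three extractors, named
def pvBFiles : List Char → Option Int :=
  pvBColonField "Number of files transferred:".toList pvBCleanFiles
def pvBTotal : List Char → Option Int :=
  pvBColonField "Total transferred file size:".toList pvBCleanTotal

lemma pvMkD_insert_files (f b t v : Int) :
    (pvMkD f b t).insert "files_transferred" v = pvMkD v b t := rfl
lemma pvMkD_insert_bytes (f b t v : Int) :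
    (pvMkD f b t).insert "bytes_sent" v = pvMkD f v t := rfl
lemma pvMkD_insert_total (f b t v : Int) :
    (pvMkD f b t).insert "total_size" v = pvMkD f b v := rfl

lemma pvBFiles_pos (l : List Char) (h : pvM1 l = true) :
    pvBFiles l = pvATryFiles l := by
  unfold pvBFiles pvBColonField pvATryFiles pvBCleanFiles
  rw [if_pos h]
  cases PySem.List.pyGet? (PySem.Chars.splitOn l ":".toList) 1 <;> rfl

lemma pvBTotal_pos (l : List Char) (h : pvM2 l = true) :
    pvBTotal l = pvATryTotal l := by
  unfold pvBTotal pvBColonField pvATryTotal pvBCleanTotal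
  rw [if_pos h]
  cases PySem.List.pyGet? (PySem.Chars.splitOn l ":".toList) 1 with
  | none => rfl
  | some s =>
    cases hg : PySem.List.pyGet? (PySem.Chars.split₀ (PySem.Chars.strip s)) 0 <;> simp [hg]

lemma pvBSent_pos (l : List Char) (h : pvM3 l = true) :
    pvBSentBytes l = pvATrySent l := by
  unfold pvBSentBytes pvATrySent
  rw [if_pos h]
  cases PySem.List.pyGet? (PySem.Chars.splitOn l "sent".toList) 1 with
  | none => rfl
  | some s =>
    simp only []
    show (match PySem.List.pyGet? (PySem.Chars.splitOn s "bytes".toList) 0 with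
          | some w => PySem.Int.ofChars? (PySem.Chars.strip (PySem.Chars.replace w ",".toList "".toList))
          | none => none) = _
    cases hg : PySem.List.pyGet? (PySem.Chars.splitOn s "bytes".toList) 0 <;> simp [hg]

lemma pvBFiles_neg (l : List Char) (h : pvM1 l = false) :
    pvBFiles l = none := by
  unfold pvBFiles pvBColonField
  rw [if_neg (by simp only [show PySem.Chars.isIn "Number of files transferred:".toList l = false from h]; exact Bool.false_ne_true)]

lemma pvBTotal_neg (l : List Char) (h : pvM2 l = false) :
    pvBTotal l = none := by
  unfold pvBTotal pvBColonField
  rw [if_neg (by simp only [show PySem.Chars.isIn "Total transferred file size:".toList l = false from h]; exact Bool.false_ne_true)]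

lemma pvBSent_neg (l : List Char) (h : pvM3 l = false) :
    pvBSentBytes l = none := by
  unfold pvBSentBytes
  rw [if_neg (by simp only [show (PySem.Chars.isIn "sent".toList (PySem.Chars.lower l) && PySem.Chars.isIn "bytes".toList (PySem.Chars.lower l)) = false from h]; exact Bool.false_ne_true)]

-- one loop step of A on the three-field dict, for a line matching at most one pattern
lemma pvAStep_mkD (f b t : Int) (l : List Char) (hm : pvMarks l ≤ 1) :
    pvAStep (pvMkD f b t) l =
      pvMkD ((pvBFiles l).getD f) ((pvBSentBytes l).getD b) ((pvBTotal l).getD t) := by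
  unfold pvAStep
  unfold pvMarks at hm
  by_cases h1 : pvM1 l = true
  all_goals by_cases h2 : pvM2 l = true
  all_goals by_cases h3 : pvM3 l = true
  all_goals simp only [Bool.not_eq_true] at h1 h2 h3
  all_goals simp only [h1, h2, h3, Bool.cond_true, Bool.cond_false] at hm
  · omega
  · omega
  · omega
  · -- files line
    rw [if_pos h1, pvBFiles_pos l h1, pvBTotal_neg l h2, pvBSent_neg l h3]
    cases pvATryFiles l with
    | none => rfl
    | some v => exact pvMkD_insert_files f b t v
  · omega
  · -- total line
    rw [if_neg (by simp only [show PySem.Chars.isIn "Number of files transferred:".toList l = false from h1]; exact Bool.false_ne_true),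
        if_pos h2, pvBFiles_neg l h1, pvBTotal_pos l h2, pvBSent_neg l h3]
    cases pvATryTotal l with
    | none => rfl
    | some v => exact pvMkD_insert_total f b t v
  · -- sent line
    rw [if_neg (by simp only [show PySem.Chars.isIn "Number of files transferred:".toList l = false from h1]; exact Bool.false_ne_true),
        if_neg (by simp only [show PySem.Chars.isIn "Total transferred file size:".toList l = false from h2]; exact Bool.false_ne_true),
        if_pos h3, pvBFiles_neg l h1, pvBTotal_neg l h2, pvBSent_pos l h3]
    cases pvATrySent l with
    | none => rfl
    | some v => exact pvMkD_insert_bytes f b t v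
  · -- no pattern
    rw [if_neg (by simp only [show PySem.Chars.isIn "Number of files transferred:".toList l = false from h1]; exact Bool.false_ne_true),
        if_neg (by simp only [show PySem.Chars.isIn "Total transferred file size:".toList l = false from h2]; exact Bool.false_ne_true),
        if_neg (by simp only [show (PySem.Chars.isIn "sent".toList (PySem.Chars.lower l) && PySem.Chars.isIn "bytes".toList (PySem.Chars.lower l)) = false from h3]; exact Bool.false_ne_true),
        pvBFiles_neg l h1, pvBTotal_neg l h2, pvBSent_neg l h3]
    rfl

-- the fold of A's loop over the three-field dict is three independent last-wins folds
lemma pvFold_mkD (ls : List (List Char)) (hm : ∀ l ∈ ls, pvMarks l ≤ 1) : ∀ f b t : Int,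
    ls.foldl pvAStep (pvMkD f b t) =
      pvMkD (ls.foldl (fun a l => (pvBFiles l).getD a) f)
            (ls.foldl (fun a l => (pvBSentBytes l).getD a) b)
            (ls.foldl (fun a l => (pvBTotal l).getD a) t) := by
  induction ls with
  | nil => intro f b t; rfl
  | cons l ls ih =>
    intro f b t
    simp only [List.foldl_cons, pvAStep_mkD f b t l (hm l (List.mem_cons_self ..)),
      ih (fun x hx => hm x (List.mem_cons_of_mem l hx))]

lemma pvLastD_append (g : List Char → Option Int) (xs : List (List Char)) (l : List Char) (d : Int) :
    pvLastD g (xs ++ [l]) d = pvLastD g xs ((g l).getD d) := by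
  induction xs with
  | nil => cases h : g l <;> simp [pvLastD, h]
  | cons x xs ih => cases h : g x <;> simp [pvLastD, h, ih]

-- the forward last-wins fold is the reverse first-hit scan
lemma pvFoldl_eq_pvLastD (g : List Char → Option Int) (ls : List (List Char)) : ∀ d : Int,
    ls.foldl (fun a l => (g l).getD a) d = pvLastD g ls.reverse d := by
  induction ls with
  | nil => intro d; rfl
  | cons l ls ih =>
    intro d
    simp only [List.foldl_cons, List.reverse_cons, pvLastD_append, ih]

lemma pvBLastMatch_eq_pvLastD (g : List Char → Option Int) (ls : List (List Char)) :
    pvBLastMatch g ls = pvLastD g ls 0 := by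
  induction ls with
  | nil => rfl
  | cons l ls ih => cases h : g l <;> simp [pvBLastMatch, pvLastD, h, ih]

-- ===== VERDICT (by name: the statement is the Claim_ definition above) =====
theorem parse_rsync_stats_py_spec : Claim_equal_parse_rsync_stats_py := by
  intro output _ hpre
  unfold Spec_parse_rsync_stats_py parse_rsync_stats_py parse_rsync_stats_py_alt
  have h0 : ((PySem.Dict.empty.insert "files_transferred" (0:Int)).insert "bytes_sent" 0).insert "total_size" 0 = pvMkD 0 0 0 := rfl
  rw [h0, pvFold_mkD _ hpre]
  simp only [pvFoldl_eq_pvLastD, pvBLastMatch_eq_pvLastD, pvBFiles, pvBTotal]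
  rfl
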